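-- pv_equiv track=rewrite | github.com/lovit/soynlp | soynlp/postagger/_lrtagger.py | _build_lrgraph
-- ===== SOURCE A (Python) =====
-- def _build_lrgraph(sents, lmax=12, rmax=8):
--     from collections import Counter
--     from collections import defaultdict
--     eojeols = Counter((eojeol for sent in sents for eojeol in sent.split() if eojeol))
--     lrgraph = defaultdict(lambda: defaultdict(int))
--     for eojeol, count in eojeols.items():
--         n = len(eojeol)
--         for i in range(1, min(n, lmax)+1):
--             (l, r) = (eojeol[:i], eojeol[i:])
--             if len(r) > rmax:
--                 continue
--             lrgraph[l][r] += count
--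
--     return lrgraph
-- ===== SOURCE B (Python) =====
-- def _build_lrgraph(sents, lmax=12, rmax=8):
--     from collections import defaultdict
--     # Single streaming pass: no Counter pre-aggregation; every eojeol occurrence
--     # contributes +1, and the (l, r) pair is built incrementally by moving one
--     # character at a time from the suffix to the prefix (no slicing by index).
--     lrgraph = defaultdict(lambda: defaultdict(int))
--     for sent in sents:
--         for eojeol in sent.split():
--             l, r = '', eojeol
--             while r and len(l) < lmax:
--                 l, r = l + r[0], r[1:]
--                 if len(r) <= rmax:
--                     lrgraph[l][r] += 1
--     return lrgraph
-- ===== Notes on version B (the rewrite author's own statement) =====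
-- stated objective: alternative
-- what changed: Drops A's Counter pre-aggregation entirely: B streams over every eojeol occurrence in one pass, adding 1 per occurrence, and replaces A's indexed range(1,min(n,lmax)+1)/slice enumeration with an incremental while loop that moves one character at a time from the suffix to the prefix.
import Mathlib
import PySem

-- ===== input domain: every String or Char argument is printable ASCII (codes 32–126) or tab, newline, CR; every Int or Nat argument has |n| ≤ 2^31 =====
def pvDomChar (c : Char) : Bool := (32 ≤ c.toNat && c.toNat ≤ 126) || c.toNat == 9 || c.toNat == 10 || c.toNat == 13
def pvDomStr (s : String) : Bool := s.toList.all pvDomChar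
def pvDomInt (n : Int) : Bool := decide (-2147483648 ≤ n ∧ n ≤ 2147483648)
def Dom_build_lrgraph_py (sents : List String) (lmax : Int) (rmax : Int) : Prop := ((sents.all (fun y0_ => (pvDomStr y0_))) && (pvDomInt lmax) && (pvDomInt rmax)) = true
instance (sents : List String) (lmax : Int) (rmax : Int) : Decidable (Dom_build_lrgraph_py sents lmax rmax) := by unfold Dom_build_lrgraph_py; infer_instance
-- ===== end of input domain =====

-- B drops A's Counter pre-aggregation: it streams over every eojeol occurrence in a single
-- pass, adding 1 per occurrence, and builds each (l, r) split incrementally by moving one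
-- character at a time from the suffix to the prefix instead of A's indexed range/slice loop
-- (objective: alternative).

-- ===== PORT A =====
def build_lrgraph_py (sents : List String) (lmax : Int) (rmax : Int) : List (String × List (String × Int)) :=
  let eojeols := PySem.Dict.counter
    (sents.flatMap (fun sent => (PySem.Str.split₀ sent).filter (fun e => !(e == ""))))
  let lrgraph := eojeols.items.foldl
    (fun (g : PySem.Dict String (PySem.Dict String Int)) ec =>
      let n := PySem.Str.len ec.1
      (PySem.List.pyRange 1 (min n lmax + 1)).foldl
        (fun g i =>
          let l := PySem.Str.slice ec.1 none (some i)
          let r := PySem.Str.slice ec.1 (some i) none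
          if rmax < PySem.Str.len r then g
          else g.modify l PySem.Dict.empty (fun inner => inner.modify r 0 (· + ec.2)))
        g)
    PySem.Dict.empty
  lrgraph.items.map (fun p => (p.1, p.2.items))

-- ===== PORT B =====
-- B's while loop: one character moves from the suffix to the prefix each iteration
-- (the char list of the Python strings l and r; exact on all inputs).
def pvPeelB (lmax rmax : Int) :
    PySem.Dict String (PySem.Dict String Int) → List Char → List Char →
    PySem.Dict String (PySem.Dict String Int)
  | g, _, [] => g
  | g, l, c :: rs =>
    if (l.length : Int) < lmax then
      let l' := l ++ [c]
      let g' := if (rs.length : Int) ≤ rmax then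
          g.modify (String.ofList l') PySem.Dict.empty
            (fun inner => inner.modify (String.ofList rs) 0 (· + 1))
        else g
      pvPeelB lmax rmax g' l' rs
    else g

def build_lrgraph_py_alt (sents : List String) (lmax : Int) (rmax : Int) : List (String × List (String × Int)) :=
  let lrgraph := sents.foldl
    (fun (g : PySem.Dict String (PySem.Dict String Int)) sent =>
      (PySem.Str.split₀ sent).foldl
        (fun g eojeol => pvPeelB lmax rmax g [] eojeol.toList) g)
    PySem.Dict.empty
  lrgraph.items.map (fun p => (p.1, p.2.items))

-- ===== PRECONDITION & SPEC =====
def Spec_build_lrgraph_py (sents : List String) (lmax : Int) (rmax : Int) (out : List (String × List (String × Int))) : Prop := out = build_lrgraph_py_alt sents lmax rmax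
instance (sents : List String) (lmax : Int) (rmax : Int) (out : List (String × List (String × Int))) : Decidable (Spec_build_lrgraph_py sents lmax rmax out) := by unfold Spec_build_lrgraph_py; infer_instance

-- ===== CLAIM (what is proved, stated in full; the proofs are below) =====
def Claim_equal_build_lrgraph_py : Prop := ∀ (sents : List String) (lmax : Int) (rmax : Int), Dom_build_lrgraph_py sents lmax rmax → Spec_build_lrgraph_py sents lmax rmax (build_lrgraph_py sents lmax rmax)

-- ===== LEMMAS AND PROOFS =====

-- one accumulation event: lrgraph[l][r] += c
def pvKAdd (g : PySem.Dict String (PySem.Dict String Int)) (k : String × String) (c : Int) :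
    PySem.Dict String (PySem.Dict String Int) :=
  g.modify k.1 PySem.Dict.empty (fun inner => inner.modify k.2 0 (· + c))

def pvStep (g : PySem.Dict String (PySem.Dict String Int)) (p : (String × String) × Int) :
    PySem.Dict String (PySem.Dict String Int) :=
  pvKAdd g p.1 p.2

-- the valid (l, r) splits of one eojeol, in position order
def pvSplitsL (lmax rmax : Int) (e : List Char) : List (String × String) :=
  ((PySem.List.pyRange 1 (min (e.length : Int) lmax + 1)).filter
    (fun i => decide ((e.length : Int) - i ≤ rmax))).map
    (fun i => (String.ofList (e.take i.toNat), String.ofList (e.drop i.toNat)))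

def pvBlockE (lmax rmax : Int) (u : String) (c : Int) : List ((String × String) × Int) :=
  (pvSplitsL lmax rmax u.toList).map (fun lr => (lr, c))

-- B's event stream: one event per occurrence, count 1
def pvEB (lmax rmax : Int) (T : List String) : List ((String × String) × Int) :=
  T.flatMap (fun u => pvBlockE lmax rmax u 1)

-- A's event stream: one event per distinct eojeol, with its multiplicity
def pvEA (lmax rmax : Int) (T : List String) : List ((String × String) × Int) :=
  (PySem.Set.ofList T).flatMap (fun u => pvBlockE lmax rmax u (T.count u : Int))

def pvSumC (k : String × String) (E : List ((String × String) × Int)) : Int :=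
  ((E.filter (fun p => p.1 == k)).map (fun p => p.2)).sum

def pvMemK (k : String × String) (D : PySem.Dict String (PySem.Dict String Int)) : Prop :=
  D.contains k.1 = true ∧ (D.getD k.1 PySem.Dict.empty).contains k.2 = true

def pvGood (D : PySem.Dict String (PySem.Dict String Int)) : Prop :=
  D.keys.Nodup ∧ ∀ p ∈ D.items, (p.2 : PySem.Dict String Int).keys.Nodup

-- ---- generic Dict facts ----
lemma pv_dict_ext {κ ν : Type} (a b : PySem.Dict κ ν) (h : a.items = b.items) : a = b := by
  cases a; cases b; cases h; rfl

lemma pv_insert_comm {κ ν : Type} [BEq κ] [LawfulBEq κ] (d : PySem.Dict κ ν) (k1 k2 : κ)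
    (v1 v2 : ν) (h2 : d.contains k2 = true) (hne : k1 ≠ k2) :
    (d.insert k1 v1).insert k2 v2 = (d.insert k2 v2).insert k1 v1 := by
  apply pv_dict_ext
  by_cases hc1 : d.contains k1 = true
  · rw [PySem.Dict.items_insert_of_contains _ v2
        (by rw [PySem.Dict.contains_insert]; simp [h2]),
      PySem.Dict.items_insert_of_contains _ v1 hc1,
      PySem.Dict.items_insert_of_contains _ v1
        (by rw [PySem.Dict.contains_insert]; simp [hc1]),
      PySem.Dict.items_insert_of_contains _ v2 h2, List.map_map, List.map_map]
    apply List.map_congr_left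
    intro p _
    by_cases e1 : p.1 = k1 <;> by_cases e2 : p.1 = k2 <;>
      simp [Function.comp, e1, e2, hne, Ne.symm hne]
  · have hc1f : d.contains k1 = false := by simpa using hc1
    have hcl : (d.insert k1 v1).contains k2 = true := by
      rw [PySem.Dict.contains_insert]; simp [h2]
    have hcr : (d.insert k2 v2).contains k1 = false := by
      rw [PySem.Dict.contains_insert]; simp [hc1f, hne]
    rw [PySem.Dict.items_insert_of_contains _ v2 hcl,
      PySem.Dict.items_insert_of_not_contains _ v1 hc1f,
      PySem.Dict.items_insert_of_not_contains _ v1 hcr,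
      PySem.Dict.items_insert_of_contains _ v2 h2, List.map_append]
    simp [hne]

lemma pv_insert_getD_self {κ ν : Type} [BEq κ] [LawfulBEq κ] (d : PySem.Dict κ ν) (k : κ)
    (w : ν) (h : d.contains k = true) (hnd : d.keys.Nodup) : d.insert k (d.getD k w) = d := by
  apply pv_dict_ext
  rw [PySem.Dict.items_insert_of_contains _ _ h]
  have hcg : ∀ p ∈ d.items, (if (p.1 == k) = true then (k, d.getD k w) else p) = p := by
    intro p hp
    obtain ⟨p1, p2⟩ := p
    by_cases e : p1 = k
    · subst e
      have := PySem.Dict.getD_of_mem_items d hp hnd w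
      simp [this]
    · simp [e]
  rw [List.map_congr_left hcg]
  simp

lemma pv_contains_getD_of_good (D : PySem.Dict String (PySem.Dict String Int)) (hG : pvGood D)
    (k1 : String) : (D.getD k1 PySem.Dict.empty).keys.Nodup := by
  by_cases hc : D.contains k1 = true
  · have hs : (D.get? k1).isSome := by
      rw [← PySem.Dict.contains_eq_isSome_get?]; exact hc
    obtain ⟨v, hv⟩ := Option.isSome_iff_exists.mp hs
    have hmem := PySem.Dict.mem_items_of_get?_eq_some D hv
    have : D.getD k1 PySem.Dict.empty = v := by
      simp [PySem.Dict.getD_eq_get?_getD, hv]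
    rw [this]
    exact hG.2 _ hmem
  · rw [PySem.Dict.getD_of_not_contains D _ (by simpa using hc)]
    simp [PySem.Dict.keys_empty]

-- ---- pvKAdd algebra ----
lemma pvKAdd_def (g : PySem.Dict String (PySem.Dict String Int)) (k : String × String) (c : Int) :
    pvKAdd g k c = g.insert k.1 ((g.getD k.1 PySem.Dict.empty).insert k.2
      ((g.getD k.1 PySem.Dict.empty).getD k.2 0 + c)) := rfl

lemma pv_merge (D : PySem.Dict String (PySem.Dict String Int)) (k : String × String) (c c' : Int) :
    pvKAdd (pvKAdd D k c) k c' = pvKAdd D k (c + c') := by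
  simp [pvKAdd_def, PySem.Dict.getD_insert_self, PySem.Dict.insert_insert_self, add_assoc]

lemma pv_comm (D : PySem.Dict String (PySem.Dict String Int)) (k p : String × String)
    (c a : Int) (h : pvMemK k D) :
    pvKAdd (pvKAdd D p a) k c = pvKAdd (pvKAdd D k c) p a := by
  by_cases hp1 : p.1 = k.1
  · by_cases hp2 : p.2 = k.2
    · have : p = k := Prod.ext hp1 hp2
      subst this
      rw [pv_merge, pv_merge, add_comm]
    · have hne2 : ¬ (k.2 = p.2) := fun hh => hp2 hh.symm
      simp only [pvKAdd_def, hp1, PySem.Dict.getD_insert_self,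
        PySem.Dict.insert_insert_self, PySem.Dict.getD_insert, hne2, hp2]
      congr 1
      exact pv_insert_comm _ _ _ _ _ h.2 (fun hh => hp2 hh)
  · have hne1 : ¬ (k.1 = p.1) := fun hh => hp1 hh.symm
    simp only [pvKAdd_def, PySem.Dict.getD_insert, hne1, hp1]
    exact pv_insert_comm _ _ _ _ _ h.1 (fun hh => hp1 hh)

lemma pv_memK_kadd_self (D : PySem.Dict String (PySem.Dict String Int)) (k : String × String)
    (c : Int) : pvMemK k (pvKAdd D k c) := by
  constructor
  · rw [pvKAdd_def]; exact PySem.Dict.contains_insert_self _ _ _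
  · rw [pvKAdd_def, PySem.Dict.getD_insert_self]
    exact PySem.Dict.contains_insert_self _ _ _

lemma pv_memK_kadd (D : PySem.Dict String (PySem.Dict String Int)) (k p : String × String)
    (a : Int) (h : pvMemK k D) : pvMemK k (pvKAdd D p a) := by
  constructor
  · rw [pvKAdd_def, PySem.Dict.contains_insert, h.1]; simp
  · rw [pvKAdd_def, PySem.Dict.getD_insert]
    by_cases e : k.1 = p.1
    · rw [if_pos e, ← e, PySem.Dict.contains_insert, h.2]; simp
    · rw [if_neg e]; exact h.2

lemma pv_good_kadd (D : PySem.Dict String (PySem.Dict String Int)) (k : String × String)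
    (c : Int) (h : pvGood D) : pvGood (pvKAdd D k c) := by
  constructor
  · rw [pvKAdd_def]; exact PySem.Dict.nodup_keys_insert _ _ _ h.1
  · intro p hp
    rw [pvKAdd_def] at hp
    rcases (PySem.Dict.mem_items_insert _ _ _ _).mp hp with heq | ⟨hmem, _⟩
    · subst heq
      exact PySem.Dict.nodup_keys_insert _ _ _ (pv_contains_getD_of_good D h k.1)
    · exact h.2 _ hmem

lemma pv_good_empty : pvGood (PySem.Dict.empty : PySem.Dict String (PySem.Dict String Int)) := by
  constructor
  · simp [PySem.Dict.keys_empty]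
  · intro p hp
    simp [PySem.Dict.empty] at hp

lemma pv_add_zero (D : PySem.Dict String (PySem.Dict String Int)) (k : String × String)
    (hG : pvGood D) (hm : pvMemK k D) : pvKAdd D k 0 = D := by
  rw [pvKAdd_def, add_zero,
      pv_insert_getD_self _ _ _ hm.2 (pv_contains_getD_of_good D hG k.1),
      pv_insert_getD_self _ _ _ hm.1 hG.1]

-- ---- pulling one key's events out of a stream ----
lemma pv_sumC_cons (k : String × String) (p : (String × String) × Int)
    (E : List ((String × String) × Int)) :
    pvSumC k (p :: E) = (if (p.1 == k) = true then p.2 else 0) + pvSumC k E := by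
  by_cases h : (p.1 == k) = true
  · simp [pvSumC, h]
  · simp [pvSumC, h]

lemma pv_sumC_filter_ne (k k' : String × String) (hne : k' ≠ k)
    (E : List ((String × String) × Int)) :
    pvSumC k' (E.filter (fun p => !(p.1 == k))) = pvSumC k' E := by
  induction E with
  | nil => rfl
  | cons p E ih =>
    by_cases e : p.1 = k
    · have h1 : pvSumC k' (p :: E) = pvSumC k' E := by
        rw [pv_sumC_cons]
        have hb : (p.1 == k') = false :=
          beq_eq_false_iff_ne.mpr (fun hh => hne (by rw [← hh]; exact e))
        rw [hb]
        simp
      have h2 : (p :: E).filter (fun q => !(q.1 == k)) = E.filter (fun q => !(q.1 == k)) := by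
        simp [e]
      rw [h2, ih, h1]
    · have h2 : (p :: E).filter (fun q => !(q.1 == k)) = p :: E.filter (fun q => !(q.1 == k)) := by
        simp [e]
      rw [h2, pv_sumC_cons, pv_sumC_cons, ih]

lemma pv_pull (E : List ((String × String) × Int)) :
    ∀ (D : PySem.Dict String (PySem.Dict String Int)) (k : String × String),
    pvGood D → pvMemK k D →
    E.foldl pvStep D = (E.filter (fun p => !(p.1 == k))).foldl pvStep (pvKAdd D k (pvSumC k E)) := by
  induction E with
  | nil =>
    intro D k hG hm
    simp [pvSumC, pv_add_zero D k hG hm]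
  | cons p E ih =>
    intro D k hG hm
    by_cases hp : p.1 = k
    · have h1 : pvStep D p = pvKAdd D k p.2 := by rw [pvStep, hp]
      rw [List.foldl_cons, h1,
          ih (pvKAdd D k p.2) k (pv_good_kadd _ _ _ hG) (pv_memK_kadd_self _ _ _),
          pv_merge]
      have h2 : (p :: E).filter (fun p => !(p.1 == k)) = E.filter (fun p => !(p.1 == k)) := by
        simp [hp]
      have h3 : pvSumC k (p :: E) = p.2 + pvSumC k E := by
        rw [pv_sumC_cons]
        have hb : (p.1 == k) = true := beq_iff_eq.mpr hp
        rw [hb]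
        simp
      rw [h2, h3]
    · rw [List.foldl_cons,
          ih (pvStep D p) k (pv_good_kadd _ _ _ hG) (pv_memK_kadd _ _ _ _ hm)]
      have h2 : (p :: E).filter (fun p => !(p.1 == k)) = p :: E.filter (fun p => !(p.1 == k)) := by
        simp [hp]
      have h3 : pvSumC k (p :: E) = pvSumC k E := by
        rw [pv_sumC_cons]
        have hb : (p.1 == k) = false := beq_eq_false_iff_ne.mpr hp
        rw [hb]
        simp
      rw [h2, h3, List.foldl_cons]
      congr 1
      exact pv_comm D k p.1 (pvSumC k E) p.2 hm

lemma pv_pullAll (s : Int) (ks : List (String × String)) :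
    ∀ (E : List ((String × String) × Int)) (D : PySem.Dict String (PySem.Dict String Int)),
    ks.Nodup → pvGood D → (∀ k ∈ ks, pvMemK k D) → (∀ k ∈ ks, pvSumC k E = s) →
    E.foldl pvStep D = (E.filter (fun p => decide (p.1 ∉ ks))).foldl pvStep
      (ks.foldl (fun g k => pvKAdd g k s) D) := by
  induction ks with
  | nil =>
    intro E D _ _ _ _
    simp
  | cons k ks ih =>
    intro E D hnd hG hmem hsum
    rw [List.nodup_cons] at hnd
    rw [pv_pull E D k hG (hmem k List.mem_cons_self)]
    rw [hsum k List.mem_cons_self]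
    rw [ih (E.filter (fun p => !(p.1 == k))) (pvKAdd D k s) hnd.2
      (pv_good_kadd _ _ _ hG)
      (fun k' hk' => pv_memK_kadd _ _ _ _ (hmem k' (List.mem_cons_of_mem _ hk')))
      (fun k' hk' => by
        rw [pv_sumC_filter_ne k k' (fun hh => hnd.1 (hh ▸ hk')) E]
        exact hsum k' (List.mem_cons_of_mem _ hk'))]
    rw [List.filter_filter]
    congr 1
    apply List.filter_congr
    intro p _
    by_cases h1 : p.1 = k <;> by_cases h2 : p.1 ∈ ks <;> simp [h1, h2]

lemma pv_memK_foldadd (c : Int) (ks : List (String × String)) :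
    ∀ (D : PySem.Dict String (PySem.Dict String Int)) (k : String × String), pvMemK k D →
    pvMemK k (ks.foldl (fun g k' => pvKAdd g k' c) D) := by
  induction ks with
  | nil => intro D k h; exact h
  | cons x ks ih =>
    intro D k h
    exact ih _ _ (pv_memK_kadd _ _ _ _ h)

lemma pv_memK_block (c : Int) (ks : List (String × String)) :
    ∀ (D : PySem.Dict String (PySem.Dict String Int)) (k : String × String), k ∈ ks →
    pvMemK k (ks.foldl (fun g k' => pvKAdd g k' c) D) := by
  induction ks with
  | nil => intro _ _ h; cases h
  | cons x ks ih =>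
    intro D k hk
    rcases List.mem_cons.mp hk with rfl | hk'
    · exact pv_memK_foldadd c ks _ _ (pv_memK_kadd_self _ _ _)
    · exact ih _ _ hk'

lemma pv_good_foldadd (c : Int) (ks : List (String × String)) :
    ∀ (D : PySem.Dict String (PySem.Dict String Int)), pvGood D →
    pvGood (ks.foldl (fun g k => pvKAdd g k c) D) := by
  induction ks with
  | nil => intro D h; exact h
  | cons x ks ih =>
    intro D h
    exact ih _ (pv_good_kadd _ _ _ h)

lemma pv_comm_foldl (a c : Int) (ks : List (String × String)) :
    ∀ (D : PySem.Dict String (PySem.Dict String Int)) (k : String × String), pvMemK k D →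
    pvKAdd (ks.foldl (fun g k' => pvKAdd g k' a) D) k c
      = ks.foldl (fun g k' => pvKAdd g k' a) (pvKAdd D k c) := by
  induction ks with
  | nil => intro D k _; rfl
  | cons x ks ih =>
    intro D k h
    rw [List.foldl_cons, List.foldl_cons,
        ih _ _ (pv_memK_kadd _ _ _ _ h), pv_comm D k x c a h]

lemma pv_block_merge (c : Int) (ks : List (String × String)) :
    ∀ (D : PySem.Dict String (PySem.Dict String Int)),
    ks.foldl (fun g k => pvKAdd g k c) (ks.foldl (fun g k => pvKAdd g k 1) D)
      = ks.foldl (fun g k => pvKAdd g k (1 + c)) D := by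
  induction ks with
  | nil => intro D; rfl
  | cons k ks ih =>
    intro D
    rw [List.foldl_cons, List.foldl_cons, List.foldl_cons,
        pv_comm_foldl 1 c ks (pvKAdd D k 1) k (pv_memK_kadd_self _ _ _),
        pv_merge, ih]

-- ---- splits facts ----
lemma pv_splits_nodup (lmax rmax : Int) (e : List Char) : (pvSplitsL lmax rmax e).Nodup := by
  apply List.Nodup.map_on
  · intro i hi j hj hij
    rw [List.mem_filter] at hi hj
    rw [PySem.List.mem_pyRange_one] at *
    have h1 := congrArg (fun q : String × String => q.1.toList.length) hij
    simp only [String.toList_ofList, List.length_take] at h1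
    have hb1 : 1 ≤ i ∧ i < min (e.length : Int) lmax + 1 := hi.1
    have hb2 : 1 ≤ j ∧ j < min (e.length : Int) lmax + 1 := hj.1
    have hmin : min (e.length : Int) lmax ≤ (e.length : Int) := min_le_left _ _
    omega
  · exact List.Nodup.filter _ (PySem.List.nodup_pyRange_one 1 _)

lemma pv_splits_concat (lmax rmax : Int) (e : List Char) (k : String × String)
    (h : k ∈ pvSplitsL lmax rmax e) : k.1.toList ++ k.2.toList = e := by
  simp only [pvSplitsL, List.mem_map] at h
  obtain ⟨i, _, rfl⟩ := h
  simp [String.toList_ofList]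

lemma pv_splits_mem_iff (lmax rmax : Int) (t u : String) (k : String × String)
    (ht : k ∈ pvSplitsL lmax rmax t.toList) :
    k ∈ pvSplitsL lmax rmax u.toList ↔ u = t := by
  constructor
  · intro hu
    have h1 := pv_splits_concat lmax rmax _ _ ht
    have h2 := pv_splits_concat lmax rmax _ _ hu
    exact String.toList_inj.mp (h2.symm.trans h1)
  · intro hh; subst hh; exact ht

lemma pv_sum_block (lmax rmax : Int) (u : String) (c : Int) (k : String × String) :
    pvSumC k (pvBlockE lmax rmax u c) = if k ∈ pvSplitsL lmax rmax u.toList then c else 0 := by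
  unfold pvSumC pvBlockE
  rw [List.filter_map, List.map_map]
  have : (fun p : (String × String) × Int => p.1 == k) ∘ (fun lr => (lr, c))
      = (fun lr => lr == k) := rfl
  rw [this]
  by_cases hm : k ∈ pvSplitsL lmax rmax u.toList
  · rw [List.filter_beq]
    rw [List.count_eq_one_of_mem (pv_splits_nodup lmax rmax u.toList) hm]
    simp [hm]
  · rw [List.filter_beq]
    rw [List.count_eq_zero_of_not_mem hm]
    simp [hm]

lemma pv_sum_blocks (lmax rmax : Int) (t : String) (k : String × String)
    (ht : k ∈ pvSplitsL lmax rmax t.toList) :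
    ∀ T : List String, pvSumC k (pvEB lmax rmax T) = (T.count t : Int) := by
  intro T
  induction T with
  | nil => simp [pvSumC, pvEB]
  | cons u T ih =>
    have happ : pvEB lmax rmax (u :: T) = pvBlockE lmax rmax u 1 ++ pvEB lmax rmax T := by
      simp [pvEB]
    have hsplit : pvSumC k (pvBlockE lmax rmax u 1 ++ pvEB lmax rmax T)
        = pvSumC k (pvBlockE lmax rmax u 1) + pvSumC k (pvEB lmax rmax T) := by
      simp [pvSumC, List.filter_append]
    rw [happ, hsplit, ih, pv_sum_block]
    by_cases e : u = t
    · subst e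
      rw [if_pos ht, List.count_cons_self]
      push_cast
      ring
    · have hnm : k ∉ pvSplitsL lmax rmax u.toList :=
        fun hm => e ((pv_splits_mem_iff lmax rmax t u k ht).mp hm)
      rw [if_neg hnm, List.count_cons, if_neg (by simp [e] : ¬ ((u == t) = true))]
      push_cast
      ring

lemma pv_filter_blocks (lmax rmax : Int) (t : String) :
    ∀ T : List String,
    (pvEB lmax rmax T).filter (fun p => decide (p.1 ∉ pvSplitsL lmax rmax t.toList))
      = pvEB lmax rmax (T.filter (fun u => !(u == t))) := by
  intro T
  induction T with
  | nil => rfl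
  | cons u T ih =>
    have happ : pvEB lmax rmax (u :: T) = pvBlockE lmax rmax u 1 ++ pvEB lmax rmax T := by
      simp [pvEB]
    rw [happ, List.filter_append, ih]
    by_cases e : u = t
    · subst e
      have hnil : (pvBlockE lmax rmax u 1).filter
          (fun p => decide (p.1 ∉ pvSplitsL lmax rmax u.toList)) = [] := by
        rw [List.filter_eq_nil_iff]
        intro p hp
        simp only [pvBlockE, List.mem_map] at hp
        obtain ⟨lr, hlr, rfl⟩ := hp
        simp [hlr]
      rw [hnil]
      simp
    · have hall : (pvBlockE lmax rmax u 1).filter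
          (fun p => decide (p.1 ∉ pvSplitsL lmax rmax t.toList)) = pvBlockE lmax rmax u 1 := by
        rw [List.filter_eq_self]
        intro p hp
        simp only [pvBlockE, List.mem_map] at hp
        obtain ⟨lr, hlr, rfl⟩ := hp
        simp only [decide_eq_true_eq]
        intro hmem
        exact e ((pv_splits_mem_iff lmax rmax t u lr hmem).mp hlr)
      rw [hall]
      have : (u :: T).filter (fun u' => !(u' == t)) = u :: T.filter (fun u' => !(u' == t)) := by
        simp [e]
      rw [this]
      simp [pvEB]

-- ---- A's grouped stream head decomposition ----
lemma pv_flatMap_congr {α β : Type} (l : List α) (f g : α → List β)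
    (h : ∀ x ∈ l, f x = g x) : l.flatMap f = l.flatMap g := by
  induction l with
  | nil => rfl
  | cons x xs ih =>
    simp only [List.flatMap_cons]
    rw [h x List.mem_cons_self, ih (fun y hy => h y (List.mem_cons_of_mem _ hy))]

lemma pv_ofList_filter {α : Type} [BEq α] [LawfulBEq α] (q : α → Bool) :
    ∀ xs : List α, PySem.Set.ofList (xs.filter q) = (PySem.Set.ofList xs).filter q := by
  intro xs
  induction xs with
  | nil => rfl
  | cons x xs ih =>
    by_cases hx : q x = true
    · rw [List.filter_cons_of_pos hx, PySem.Set.ofList_cons, PySem.Set.ofList_cons,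
          List.filter_cons_of_pos hx]
      congr 1
      show (PySem.Set.ofList (xs.filter q)).filter (fun y => !(y == x))
          = ((PySem.Set.ofList xs).filter (fun y => !(y == x))).filter q
      rw [ih, List.filter_filter, List.filter_filter]
      apply List.filter_congr
      intro a _
      rw [Bool.and_comm]
    · rw [List.filter_cons_of_neg hx, PySem.Set.ofList_cons,
          List.filter_cons_of_neg hx, ih]
      show (PySem.Set.ofList xs).filter q
          = ((PySem.Set.ofList xs).filter (fun y => !(y == x))).filter q
      rw [List.filter_filter]
      apply List.filter_congr
      intro a _
      by_cases e : a = x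
      · subst e
        simp [hx]
      · simp [e]

lemma pv_EA_cons (lmax rmax : Int) (t : String) (T : List String) :
    pvEA lmax rmax (t :: T) = pvBlockE lmax rmax t ((T.count t : Int) + 1)
      ++ pvEA lmax rmax (T.filter (fun u => !(u == t))) := by
  unfold pvEA
  rw [PySem.Set.ofList_cons, List.flatMap_cons]
  congr 1
  · rw [List.count_cons_self]
    push_cast
    rfl
  · show ((PySem.Set.ofList T).discard t).flatMap
        (fun u => pvBlockE lmax rmax u ((t :: T).count u : Int)) = _
    have hd : (PySem.Set.ofList T).discard t
        = PySem.Set.ofList (T.filter (fun u => !(u == t))) := by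
      rw [pv_ofList_filter]
      rfl
    rw [hd]
    apply pv_flatMap_congr
    intro u hu
    have hu' : u ∈ T.filter (fun u' => !(u' == t)) := (PySem.List.mem_dedup _ u).mp hu
    rw [List.mem_filter] at hu'
    have hne : u ≠ t := by simpa using hu'.2
    congr 1
    rw [List.count_cons, if_neg (by simpa using Ne.symm hne), add_zero,
        ← List.count_filter (p := fun u' => !(u' == t)) (by simpa using hne)]

-- ---- the main induction: streaming = grouped ----
lemma pv_main (lmax rmax : Int) :
    ∀ (n : Nat) (T : List String) (D : PySem.Dict String (PySem.Dict String Int)),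
    T.length ≤ n → pvGood D →
    (pvEB lmax rmax T).foldl pvStep D = (pvEA lmax rmax T).foldl pvStep D := by
  intro n
  induction n with
  | zero =>
    intro T D hlen _
    have : T = [] := List.eq_nil_of_length_eq_zero (Nat.le_zero.mp hlen)
    subst this
    rfl
  | succ n ih =>
    intro T D hlen hG
    match T with
    | [] => rfl
    | t :: T' =>
      have happ : pvEB lmax rmax (t :: T') = pvBlockE lmax rmax t 1 ++ pvEB lmax rmax T' := by
        simp [pvEB]
      set ks := pvSplitsL lmax rmax t.toList with hks
      have hblock : ∀ (c : Int) (D0 : PySem.Dict String (PySem.Dict String Int)),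
          (pvBlockE lmax rmax t c).foldl pvStep D0 = ks.foldl (fun g k => pvKAdd g k c) D0 := by
        intro c D0
        rw [pvBlockE, List.foldl_map]
        rfl
      rw [happ, List.foldl_append, hblock 1 D]
      set c' : Int := (T'.count t : Int) with hc'
      rw [pv_pullAll c' ks (pvEB lmax rmax T')
            (ks.foldl (fun g k => pvKAdd g k 1) D)
            (pv_splits_nodup lmax rmax t.toList)
            (pv_good_foldadd 1 ks D hG)
            (fun k hk => pv_memK_block 1 ks D k hk)
            (fun k hk => pv_sum_blocks lmax rmax t k hk T')]
      rw [pv_filter_blocks lmax rmax t T', pv_block_merge]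
      rw [ih (T'.filter (fun u => !(u == t)))
            (ks.foldl (fun g k => pvKAdd g k (1 + c')) D)
            (by
              have h1 : (T'.filter (fun u => !(u == t))).length ≤ T'.length :=
                List.length_filter_le _ _
              simp only [List.length_cons] at hlen
              omega)
            (pv_good_foldadd _ ks D hG)]
      rw [pv_EA_cons lmax rmax t T', List.foldl_append, hblock (c' + 1) D]
      have : (1 : Int) + c' = c' + 1 := by ring
      rw [this]

-- ---- port-shape conversions ----
lemma pv_foldl_filter_pos {α β : Type} (xs : List α) (P : α → Prop) [DecidablePred P]
    (f : β → α → β) (g : β) :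
    xs.foldl (fun a x => if P x then f a x else a) g
      = (xs.filter (fun x => decide (P x))).foldl f g := by
  induction xs generalizing g with
  | nil => rfl
  | cons x xs ih =>
    by_cases h : P x
    · simp [h, ih]
    · simp [h, ih]

lemma pv_foldl_filter_neg {α β : Type} (xs : List α) (P : α → Prop) [DecidablePred P]
    (f : β → α → β) (g : β) :
    xs.foldl (fun a x => if P x then a else f a x) g
      = (xs.filter (fun x => decide (¬ P x))).foldl f g := by
  induction xs generalizing g with
  | nil => rfl
  | cons x xs ih =>
    by_cases h : P x
    · simp [h, ih]
    · simp [h, ih]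

lemma pv_len_slice_from (e : String) (i : Int) (h0 : 0 ≤ i) (h1 : i ≤ (e.toList.length : Int)) :
    PySem.Str.len (PySem.Str.slice e (some i) none) = (e.toList.length : Int) - i := by
  have hl : (PySem.Str.slice e (some i) none).toList = e.toList.drop i.toNat := by
    rw [PySem.Str.toList_slice, PySem.Chars.slice_eq_listSlice, PySem.List.slice_from _ h0]
  rw [PySem.Str.len_eq, hl, List.length_drop]
  omega

lemma pv_slice_take (e : String) (i : Int) (h0 : 0 ≤ i) :
    PySem.Str.slice e none (some i) = String.ofList (e.toList.take i.toNat) := by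
  rw [← String.toList_inj, PySem.Str.toList_slice, PySem.Chars.slice_eq_listSlice,
      PySem.List.slice_to _ h0, String.toList_ofList]

lemma pv_slice_drop (e : String) (i : Int) (h0 : 0 ≤ i) :
    PySem.Str.slice e (some i) none = String.ofList (e.toList.drop i.toNat) := by
  rw [← String.toList_inj, PySem.Str.toList_slice, PySem.Chars.slice_eq_listSlice,
      PySem.List.slice_from _ h0, String.toList_ofList]

-- A's inner loop (range + slices + skip) computes the per-eojeol block fold
lemma pv_inner_A (lmax rmax : Int) (e : String) (c : Int)
    (g : PySem.Dict String (PySem.Dict String Int)) :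
    (PySem.List.pyRange 1 (min (PySem.Str.len e) lmax + 1)).foldl
      (fun g i =>
        if rmax < PySem.Str.len (PySem.Str.slice e (some i) none) then g
        else pvKAdd g (PySem.Str.slice e none (some i), PySem.Str.slice e (some i) none) c) g
      = (pvBlockE lmax rmax e c).foldl pvStep g := by
  rw [PySem.Str.len_eq, pv_foldl_filter_neg]
  have hfe : (PySem.List.pyRange 1 (min (e.toList.length : Int) lmax + 1)).filter
        (fun i => decide (¬ rmax < PySem.Str.len (PySem.Str.slice e (some i) none)))
      = (PySem.List.pyRange 1 (min (e.toList.length : Int) lmax + 1)).filter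
        (fun i => decide ((e.toList.length : Int) - i ≤ rmax)) := by
    apply List.filter_congr
    intro i hi
    rw [PySem.List.mem_pyRange_one] at hi
    have hmin : min (e.toList.length : Int) lmax ≤ (e.toList.length : Int) := min_le_left _ _
    rw [pv_len_slice_from e i (by omega) (by omega), decide_eq_decide]
    omega
  rw [hfe]
  rw [pvBlockE, pvSplitsL, List.map_map, List.foldl_map]
  apply PySem.List.foldl_congr_mem
  intro acc i hi
  rw [List.mem_filter, PySem.List.mem_pyRange_one] at hi
  rw [pv_slice_take e i (by omega), pv_slice_drop e i (by omega)]
  rfl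

-- B's while loop, started at split position |l|+1, computes the remaining range fold
lemma pv_peel_spec (lmax rmax : Int) (e : List Char) :
    ∀ (r l : List Char) (g : PySem.Dict String (PySem.Dict String Int)), l ++ r = e →
    pvPeelB lmax rmax g l r
      = (PySem.List.pyRange ((l.length : Int) + 1) (min (e.length : Int) lmax + 1)).foldl
        (fun g i => if ((e.length : Int) - i ≤ rmax)
          then pvKAdd g (String.ofList (e.take i.toNat), String.ofList (e.drop i.toNat)) 1
          else g) g := by
  intro r
  induction r with
  | nil =>
    intro l g he
    rw [List.append_nil] at he
    subst he
    have hmin : min ((l.length : Int)) lmax ≤ (l.length : Int) := min_le_left _ _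
    rw [PySem.List.pyRange_one_eq_nil (by omega)]
    rfl
  | cons c rs ih =>
    intro l g he
    have hn : e.length = l.length + 1 + rs.length := by
      rw [← he]; simp; omega
    by_cases hl : (l.length : Int) < lmax
    · have hmin1 : (l.length : Int) + 1 ≤ min (e.length : Int) lmax := by
        have : (l.length : Int) + 1 ≤ (e.length : Int) := by
          rw [hn]; push_cast; omega
        omega
      rw [PySem.List.pyRange_one_cons (by omega)]
      rw [List.foldl_cons]
      have htoNat : ((l.length : Int) + 1).toNat = l.length + 1 := by omega
      have htake : e.take (l.length + 1) = l ++ [c] := by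
        rw [← he, List.take_append, List.take_of_length_le (by omega),
            Nat.add_sub_cancel_left]
        rfl
      have hdrop : e.drop (l.length + 1) = rs := by
        rw [← he, List.drop_append, List.drop_of_length_le (by omega),
            Nat.add_sub_cancel_left]
        rfl
      have hcond : ((e.length : Int) - ((l.length : Int) + 1) ≤ rmax)
          ↔ ((rs.length : Int) ≤ rmax) := by
        rw [hn]; push_cast; omega
      have hunfold : pvPeelB lmax rmax g l (c :: rs)
          = if (l.length : Int) < lmax then
              pvPeelB lmax rmax
                (if (rs.length : Int) ≤ rmax then
                  g.modify (String.ofList (l ++ [c])) PySem.Dict.empty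
                    (fun inner => inner.modify (String.ofList rs) 0 (· + 1))
                else g) (l ++ [c]) rs
            else g := rfl
      rw [hunfold, if_pos hl]
      have hbody : (if ((e.length : Int) - ((l.length : Int) + 1) ≤ rmax)
          then pvKAdd g (String.ofList (e.take ((l.length : Int) + 1).toNat),
            String.ofList (e.drop ((l.length : Int) + 1).toNat)) 1
          else g)
          = (if (rs.length : Int) ≤ rmax then
              g.modify (String.ofList (l ++ [c])) PySem.Dict.empty
                (fun inner => inner.modify (String.ofList rs) 0 (· + 1))
            else g) := by
        rw [htoNat, htake, hdrop]
        by_cases hc : (rs.length : Int) ≤ rmax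
        · rw [if_pos (hcond.mpr hc), if_pos hc]
          rfl
        · rw [if_neg (fun hh => hc (hcond.mp hh)), if_neg hc]
      rw [← hbody]
      have hlen' : ((l ++ [c]).length : Int) = (l.length : Int) + 1 := by
        simp
      rw [ih (l ++ [c]) _ (by rw [← he]; simp)]
      rw [hlen']
    · have hmin2 : min (e.length : Int) lmax ≤ lmax := min_le_right _ _
      rw [PySem.List.pyRange_one_eq_nil (by omega)]
      have hunfold : pvPeelB lmax rmax g l (c :: rs)
          = if (l.length : Int) < lmax then
              pvPeelB lmax rmax
                (if (rs.length : Int) ≤ rmax then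
                  g.modify (String.ofList (l ++ [c])) PySem.Dict.empty
                    (fun inner => inner.modify (String.ofList rs) 0 (· + 1))
                else g) (l ++ [c]) rs
            else g := rfl
      rw [hunfold, if_neg hl]
      rfl

lemma pv_inner_B (lmax rmax : Int) (e : String)
    (g : PySem.Dict String (PySem.Dict String Int)) :
    pvPeelB lmax rmax g [] e.toList = (pvBlockE lmax rmax e 1).foldl pvStep g := by
  rw [pv_peel_spec lmax rmax e.toList e.toList [] g rfl]
  simp only [List.length_nil, Nat.cast_zero, zero_add]
  rw [pv_foldl_filter_pos]
  rw [pvBlockE, pvSplitsL, List.map_map, List.foldl_map]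
  rfl

-- ---- split() never yields the empty string ----
lemma pv_split0_go_ne_nil (s : List Char) :
    ∀ (cur : List Char) (acc : List (List Char)), (∀ w ∈ acc, w ≠ []) →
    ∀ w ∈ PySem.Chars.split₀.go s cur acc, w ≠ [] := by
  induction s with
  | nil =>
    intro cur acc hacc w hw
    rw [show PySem.Chars.split₀.go [] cur acc
        = if cur.isEmpty then acc.reverse else (cur.reverse :: acc).reverse from rfl] at hw
    by_cases hc : cur.isEmpty
    · rw [if_pos hc] at hw
      exact hacc w (List.mem_reverse.mp hw)
    · rw [if_neg hc] at hw
      rcases List.mem_cons.mp (List.mem_reverse.mp hw) with rfl | h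
      · simp only [ne_eq, List.reverse_eq_nil_iff]
        intro hh
        rw [hh] at hc
        exact hc rfl
      · exact hacc _ h
  | cons c rest ih =>
    intro cur acc hacc w hw
    rw [show PySem.Chars.split₀.go (c :: rest) cur acc
        = if PySem.Chars.isspace c then
            (if cur.isEmpty then PySem.Chars.split₀.go rest [] acc
             else PySem.Chars.split₀.go rest [] (cur.reverse :: acc))
          else PySem.Chars.split₀.go rest (c :: cur) acc from rfl] at hw
    by_cases hs : PySem.Chars.isspace c
    · rw [if_pos hs] at hw
      by_cases hc : cur.isEmpty
      · rw [if_pos hc] at hw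
        exact ih [] acc hacc w hw
      · rw [if_neg hc] at hw
        refine ih [] (cur.reverse :: acc) ?_ w hw
        intro w' hw'
        rcases List.mem_cons.mp hw' with rfl | h
        · simp only [ne_eq, List.reverse_eq_nil_iff]
          intro hh
          rw [hh] at hc
          exact hc rfl
        · exact hacc w' h
    · rw [if_neg hs] at hw
      exact ih (c :: cur) acc hacc w hw

lemma pv_split₀_ne_empty (s : String) : ∀ e ∈ PySem.Str.split₀ s, (e == "") = false := by
  intro e he
  simp only [PySem.Str.split₀, List.mem_map] at he
  obtain ⟨w, hw, rfl⟩ := he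
  have hne : w ≠ [] :=
    pv_split0_go_ne_nil s.toList [] [] (fun _ h => by simp at h) w hw
  have hb : (String.ofList w == "") = false := by
    refine beq_eq_false_iff_ne.mpr (fun hh => hne ?_)
    have := congrArg String.toList hh
    simpa [String.toList_ofList] using this
  exact hb

-- ===== VERDICT (by name: the statement is the Claim_ definition above) =====
theorem build_lrgraph_py_spec : Claim_equal_build_lrgraph_py := by
  intro sents lmax rmax _hdom
  show build_lrgraph_py sents lmax rmax = build_lrgraph_py_alt sents lmax rmax
  simp only [build_lrgraph_py, build_lrgraph_py_alt]
  set T : List String := sents.flatMap (fun s => PySem.Str.split₀ s) with hT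
  have hTA : sents.flatMap (fun sent => (PySem.Str.split₀ sent).filter (fun e => !(e == ""))) = T := by
    rw [hT]
    apply pv_flatMap_congr
    intro s _
    exact List.filter_eq_self.mpr (fun a ha => by rw [pv_split₀_ne_empty s a ha]; rfl)
  rw [hTA]
  have hA : (PySem.Dict.counter T).items.foldl
      (fun (g : PySem.Dict String (PySem.Dict String Int)) ec =>
        (PySem.List.pyRange 1 (min (PySem.Str.len ec.1) lmax + 1)).foldl
          (fun g i =>
            if rmax < PySem.Str.len (PySem.Str.slice ec.1 (some i) none) then g
            else g.modify (PySem.Str.slice ec.1 none (some i)) PySem.Dict.empty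
              (fun inner => inner.modify (PySem.Str.slice ec.1 (some i) none) 0 (· + ec.2)))
          g)
      PySem.Dict.empty
      = (pvEA lmax rmax T).foldl pvStep PySem.Dict.empty := by
    rw [PySem.Dict.items_counter, List.foldl_map, pvEA, List.foldl_flatMap]
    apply PySem.List.foldl_congr_mem
    intro acc u _
    exact pv_inner_A lmax rmax u (T.count u : Int) acc
  have hB : sents.foldl
      (fun (g : PySem.Dict String (PySem.Dict String Int)) sent =>
        (PySem.Str.split₀ sent).foldl
          (fun g eojeol => pvPeelB lmax rmax g [] eojeol.toList) g)
      PySem.Dict.empty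
      = (pvEB lmax rmax T).foldl pvStep PySem.Dict.empty := by
    rw [pvEB, List.foldl_flatMap, hT, List.foldl_flatMap]
    apply PySem.List.foldl_congr_mem
    intro acc s _
    apply PySem.List.foldl_congr_mem
    intro acc' e _
    exact pv_inner_B lmax rmax e acc'
  rw [hA, hB, pv_main lmax rmax T.length T PySem.Dict.empty (Nat.le_refl _) pv_good_empty]
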